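-- pv_equiv track=rewrite | github.com/robinbanbury/battleships | generate_grid.py | validate_ship_coordinates
-- ===== SOURCE A (Python) =====
-- def validate_ship_coordinates(ship_coordinates, existing_ships, grid_width=10, grid_height=10):
--     for coordinate in ship_coordinates:
--         if coordinate[0] >= grid_width or coordinate[0] < 0 or coordinate[1] >= grid_height or coordinate[1] < 0:
--             return False
--         for existing_ship in existing_ships:
--             for existing_coordinate in existing_ship:
--                 if coordinate[0] == existing_coordinate[0] and coordinate[1] == existing_coordinate[1]:
--                     return False
--     return True
-- ===== SOURCE B (Python) =====
-- def validate_ship_coordinates(ship_coordinates, existing_ships, grid_width=10, grid_height=10):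
--     # Bounds as one aggregate test: min/max of each axis instead of a per-cell scan.
--     if ship_coordinates:
--         xs = [c[0] for c in ship_coordinates]
--         ys = [c[1] for c in ship_coordinates]
--         if min(xs) < 0 or max(xs) >= grid_width or min(ys) < 0 or max(ys) >= grid_height:
--             return False
--     # Overlap by sort-merge: sort both coordinate lists, then a two-pointer
--     # walk detects any common cell (classic sorted-intersection join).
--     new = sorted((c[0], c[1]) for c in ship_coordinates)
--     old = sorted((c[0], c[1]) for ship in existing_ships for c in ship)
--     i = j = 0
--     while i < len(new) and j < len(old):
--         if new[i] < old[j]: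
--             i += 1
--         elif old[j] < new[i]:
--             j += 1
--         else:
--             return False
--     return True
-- ===== Notes on version B (the rewrite author's own statement) =====
-- stated objective: faster
-- what changed: Replaces A's per-coordinate triple-nested scan with an aggregate min/max bounds test plus a sort-merge (two-pointer) intersection of the sorted new and existing coordinate lists.
import Mathlib
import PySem

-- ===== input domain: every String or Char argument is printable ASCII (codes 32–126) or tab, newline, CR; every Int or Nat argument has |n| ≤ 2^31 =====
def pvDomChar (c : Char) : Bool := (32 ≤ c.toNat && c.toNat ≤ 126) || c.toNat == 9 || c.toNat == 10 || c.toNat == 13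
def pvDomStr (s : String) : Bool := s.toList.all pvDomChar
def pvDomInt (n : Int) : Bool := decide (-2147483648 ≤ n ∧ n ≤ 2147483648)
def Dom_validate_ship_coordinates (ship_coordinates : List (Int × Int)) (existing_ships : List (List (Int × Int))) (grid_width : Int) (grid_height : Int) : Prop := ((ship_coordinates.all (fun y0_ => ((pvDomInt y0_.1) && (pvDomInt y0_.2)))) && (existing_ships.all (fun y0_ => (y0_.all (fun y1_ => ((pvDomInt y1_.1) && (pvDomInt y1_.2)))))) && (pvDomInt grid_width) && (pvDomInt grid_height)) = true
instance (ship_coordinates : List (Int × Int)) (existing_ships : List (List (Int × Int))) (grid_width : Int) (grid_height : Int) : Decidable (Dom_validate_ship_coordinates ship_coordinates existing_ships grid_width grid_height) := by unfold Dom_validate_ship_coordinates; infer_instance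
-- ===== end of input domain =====

-- B replaces A's per-coordinate triple-nested scan by an aggregate min/max bounds test
-- plus a sort-merge (two-pointer) intersection of the sorted coordinate lists.
-- ===== PORT A =====
-- inner 'for existing_coordinate in existing_ship' loop of A
def pvHitShip (c : Int × Int) : List (Int × Int) → Bool
  | [] => false
  | e :: rest => if c.1 == e.1 && c.2 == e.2 then true else pvHitShip c rest

-- the 'for existing_ship in existing_ships' loop of A
def pvHitShips (c : Int × Int) : List (List (Int × Int)) → Bool
  | [] => false
  | s :: rest => if pvHitShip c s then true else pvHitShips c rest

def validate_ship_coordinates (ship_coordinates : List (Int × Int)) (existing_ships : List (List (Int × Int))) (grid_width : Int) (grid_height : Int) : Bool :=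
  match ship_coordinates with
  | [] => true
  | c :: rest =>
    if c.1 ≥ grid_width || c.1 < 0 || c.2 ≥ grid_height || c.2 < 0 then false
    else if pvHitShips c existing_ships then false
    else validate_ship_coordinates rest existing_ships grid_width grid_height

-- ===== PORT B =====
-- Python's tuple '<' on pairs of ints (hand port, exact: lexicographic comparison)
def pvTupLt (a b : Int × Int) : Bool := a.1 < b.1 || (a.1 == b.1 && a.2 < b.2)

-- Source B's two-pointer while loop; advancing i (resp. j) is recursion on the first (resp. second) suffix
def pvMergeLoop : List (Int × Int) → List (Int × Int) → Bool
  | a :: as_, b :: bs =>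
    if pvTupLt a b then pvMergeLoop as_ (b :: bs)
    else if pvTupLt b a then pvMergeLoop (a :: as_) bs
    else false
  | _, _ => true
  termination_by xs ys => xs.length + ys.length

-- Source B's aggregate bounds test: 'if ship_coordinates: ... min/max ...'
def pvBoundsBad (sc : List (Int × Int)) (w h : Int) : Bool :=
  match sc with
  | [] => false
  | _ =>
    let xs := sc.map (fun c => c.1)
    let ys := sc.map (fun c => c.2)
    match PySem.List.min? xs (fun v => v), PySem.List.max? xs (fun v => v),
          PySem.List.min? ys (fun v => v), PySem.List.max? ys (fun v => v) with
    | some mnx, some mxx, some mny, some mxy => mnx < 0 || mxx ≥ w || mny < 0 || mxy ≥ h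
    | _, _, _, _ => false

def validate_ship_coordinates_alt (ship_coordinates : List (Int × Int)) (existing_ships : List (List (Int × Int))) (grid_width : Int) (grid_height : Int) : Bool :=
  if pvBoundsBad ship_coordinates grid_width grid_height then false
  else
    -- sorted(...) on pairs of ints = PySem.List.sorted2 with the two tuple components as keys
    let newL := PySem.List.sorted2 (ship_coordinates.map (fun c => (c.1, c.2))) Prod.fst Prod.snd
    let oldL := PySem.List.sorted2 ((existing_ships.flatMap (fun ship => ship.map (fun c => (c.1, c.2))))) Prod.fst Prod.snd
    pvMergeLoop newL oldL

-- ===== PRECONDITION & SPEC =====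
def Spec_validate_ship_coordinates (ship_coordinates : List (Int × Int)) (existing_ships : List (List (Int × Int))) (grid_width : Int) (grid_height : Int) (out : Bool) : Prop := out = validate_ship_coordinates_alt ship_coordinates existing_ships grid_width grid_height
instance (ship_coordinates : List (Int × Int)) (existing_ships : List (List (Int × Int))) (grid_width : Int) (grid_height : Int) (out : Bool) : Decidable (Spec_validate_ship_coordinates ship_coordinates existing_ships grid_width grid_height out) := by unfold Spec_validate_ship_coordinates; infer_instance

-- ===== CLAIM (what is proved, stated in full; the proofs are below) =====
def Claim_equal_validate_ship_coordinates : Prop := ∀ (ship_coordinates : List (Int × Int)) (existing_ships : List (List (Int × Int))) (grid_width : Int) (grid_height : Int), Dom_validate_ship_coordinates ship_coordinates existing_ships grid_width grid_height → Spec_validate_ship_coordinates ship_coordinates existing_ships grid_width grid_height (validate_ship_coordinates ship_coordinates existing_ships grid_width grid_height)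

-- ===== LEMMAS AND PROOFS =====

lemma pvHitShip_eq (c : Int × Int) (s : List (Int × Int)) :
    pvHitShip c s = decide (c ∈ s) := by
  induction s with
  | nil => simp [pvHitShip]
  | cons e rest ih =>
    simp only [pvHitShip, ih]
    by_cases h : c = e
    · subst h; simp
    · have hne : ¬ (c.1 == e.1 && c.2 == e.2) = true := by
        simp only [Bool.and_eq_true, beq_iff_eq, Prod.ext_iff] at *
        exact fun hh => h hh
      simp [hne, h]

lemma pvHitShips_eq (c : Int × Int) (ships : List (List (Int × Int))) :
    pvHitShips c ships = decide (∃ s ∈ ships, c ∈ s) := by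
  induction ships with
  | nil => simp [pvHitShips]
  | cons s rest ih =>
    simp only [pvHitShips, pvHitShip_eq, ih]
    by_cases h : c ∈ s <;> simp [h]

lemma pvA_true_iff (sc : List (Int × Int)) (ships : List (List (Int × Int))) (w h : Int) :
    validate_ship_coordinates sc ships w h = true ↔
      ∀ c ∈ sc, (0 ≤ c.1 ∧ c.1 < w ∧ 0 ≤ c.2 ∧ c.2 < h) ∧ ¬ ∃ s ∈ ships, c ∈ s := by
  induction sc with
  | nil => simp [validate_ship_coordinates]
  | cons c rest ih =>
    simp only [validate_ship_coordinates, pvHitShips_eq, List.forall_mem_cons]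
    by_cases hb : (0 ≤ c.1 ∧ c.1 < w ∧ 0 ≤ c.2 ∧ c.2 < h)
    · have hB : (decide (c.1 ≥ w) || decide (c.1 < 0) || decide (c.2 ≥ h) || decide (c.2 < 0)) = false := by
        simp only [Bool.or_eq_false_iff, decide_eq_false_iff_not]; omega
      rw [if_neg (by simp [hB])]
      by_cases ho : ∃ s ∈ ships, c ∈ s
      · rw [if_pos (by simpa using ho)]
        simp only [Bool.false_eq_true, false_iff]
        rintro ⟨⟨-, hno⟩, -⟩; exact hno ho
      · rw [if_neg (by simpa using ho), ih]
        constructor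
        · intro hr; exact ⟨⟨hb, ho⟩, hr⟩
        · rintro ⟨-, hr⟩; exact hr
    · have hB : (decide (c.1 ≥ w) || decide (c.1 < 0) || decide (c.2 ≥ h) || decide (c.2 < 0)) = true := by
        simp only [Bool.or_eq_true, decide_eq_true_eq]; omega
      rw [if_pos hB]
      simp only [Bool.false_eq_true, false_iff]
      rintro ⟨⟨hnb, -⟩, -⟩; exact hb hnb

-- the strict/non-strict lexicographic orders on Int pairs, as Props
def pvLexLt (a b : Int × Int) : Prop := a.1 < b.1 ∨ (a.1 = b.1 ∧ a.2 < b.2)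
def pvLexLe (a b : Int × Int) : Prop := a.1 < b.1 ∨ (a.1 = b.1 ∧ a.2 ≤ b.2)

lemma pvTupLt_iff (a b : Int × Int) : pvTupLt a b = true ↔ pvLexLt a b := by
  simp [pvTupLt, pvLexLt]

-- sorted2 with the two projections sorts by the lexicographic order on the pair
lemma pvSorted2_pairwise (l : List (Int × Int)) :
    List.Pairwise pvLexLe (PySem.List.sorted2 l Prod.fst Prod.snd) := by
  have hbefore : (fun a b : Int × Int =>
      (decide (a.1 < b.1) || (!decide (b.1 < a.1) && decide (a.2 < b.2)))) =
      (fun a b : Int × Int => decide ((toLex a : Int ×ₗ Int) < toLex b)) := by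
    funext a b
    rw [Bool.eq_iff_iff]
    simp only [Bool.or_eq_true, Bool.and_eq_true, Bool.not_eq_true', decide_eq_true_eq,
      decide_eq_false_iff_not, Prod.Lex.toLex_lt_toLex]
    omega
  have key : ∀ (acc : List (Int × Int)),
      List.Pairwise (fun a b : Int × Int => (toLex a : Int ×ₗ Int) ≤ toLex b) acc →
      List.Pairwise (fun a b : Int × Int => (toLex a : Int ×ₗ Int) ≤ toLex b)
        (l.foldl (fun acc x => PySem.List.insertBy
          (fun a b => decide ((toLex a : Int ×ₗ Int) < toLex b)) x acc) acc) := by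
    induction l with
    | nil => intro acc h; exact h
    | cons x t ih =>
      intro acc h
      exact ih _ (PySem.List.insertBy_pairwise_le (fun p : Int × Int => (toLex p : Int ×ₗ Int)) x acc h)
  have hs : PySem.List.sorted2 l Prod.fst Prod.snd =
      l.foldl (fun acc x => PySem.List.insertBy
        (fun a b => decide ((toLex a : Int ×ₗ Int) < toLex b)) x acc) [] := by
    simp only [PySem.List.sorted2, Bool.false_eq_true, if_false, hbefore]
  rw [hs]
  refine (key [] (by simp)).imp ?_
  intro a b hab
  rw [Prod.Lex.toLex_le_toLex] at hab
  exact hab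

lemma pvMergeLoop_true_iff (xs ys : List (Int × Int)) :
    List.Pairwise pvLexLe xs → List.Pairwise pvLexLe ys →
    (pvMergeLoop xs ys = true ↔ ∀ a ∈ xs, a ∉ ys) := by
  induction xs, ys using pvMergeLoop.induct with
  | case1 a as_ b bs hlt ih =>
    intro hx hy
    rw [show pvMergeLoop (a :: as_) (b :: bs) = pvMergeLoop as_ (b :: bs) by
      rw [pvMergeLoop]; simp [hlt]]
    rw [ih hx.of_cons hy]
    have hanot : a ∉ b :: bs := by
      rw [pvTupLt_iff] at hlt
      intro hmem
      rcases List.mem_cons.mp hmem with rfl | hmem'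
      · rcases hlt with h | ⟨h1, h2⟩ <;> omega
      · have := (List.pairwise_cons.mp hy).1 a hmem'
        unfold pvLexLe at this
        rcases hlt with h | ⟨h1, h2⟩ <;> rcases this with h' | ⟨h1', h2'⟩ <;> omega
    constructor
    · intro hr x hx'
      rcases List.mem_cons.mp hx' with rfl | hx''
      · exact hanot
      · exact hr x hx''
    · intro hr x hx'; exact hr x (List.mem_cons_of_mem a hx')
  | case2 a as_ b bs hnlt hlt ih =>
    intro hx hy
    rw [show pvMergeLoop (a :: as_) (b :: bs) = pvMergeLoop (a :: as_) bs by
      rw [pvMergeLoop]; simp [hnlt, hlt]]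
    rw [ih hx hy.of_cons]
    have hbnot : ∀ x ∈ a :: as_, x ≠ b := by
      rw [pvTupLt_iff] at hlt
      intro x hx' heq
      subst heq
      rcases List.mem_cons.mp hx' with heq' | hx''
      · subst heq'
        rcases hlt with h3 | ⟨h3, h4⟩ <;> omega
      · have := (List.pairwise_cons.mp hx).1 x hx''
        unfold pvLexLe at this
        rcases hlt with h | ⟨h1, h2⟩ <;> rcases this with h' | ⟨h1', h2'⟩ <;> omega
    constructor
    · intro hr x hx' hmem
      rcases List.mem_cons.mp hmem with hb | hmem'
      · exact hbnot x hx' hb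
      · exact hr x hx' hmem'
    · intro hr x hx' hmem
      exact hr x hx' (List.mem_cons_of_mem b hmem)
  | case3 a as_ b bs hnlt hnlt' =>
    intro hx hy
    rw [show pvMergeLoop (a :: as_) (b :: bs) = false by
      rw [pvMergeLoop]; simp [hnlt, hnlt']]
    have hab : a = b := by
      rw [pvTupLt_iff] at hnlt hnlt'
      unfold pvLexLt at hnlt hnlt'
      have h1 : a.1 = b.1 ∧ a.2 = b.2 := by omega
      exact Prod.ext_iff.mpr h1
    simp only [Bool.false_eq_true, false_iff]
    intro hr
    exact hr a (List.mem_cons_self) (hab ▸ List.mem_cons_self)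
  | case4 x y hno =>
    intro hx hy
    match x, y with
    | [], ys => simp [pvMergeLoop]
    | a :: as_, [] => simp [pvMergeLoop]
    | a :: as_, b :: bs => exact absurd (rfl : a :: as_ = a :: as_) (fun _ => hno a as_ b bs rfl rfl)

lemma pvBoundsBad_false_iff (sc : List (Int × Int)) (w h : Int) :
    pvBoundsBad sc w h = false ↔ ∀ c ∈ sc, 0 ≤ c.1 ∧ c.1 < w ∧ 0 ≤ c.2 ∧ c.2 < h := by
  cases sc with
  | nil => simp [pvBoundsBad]
  | cons c0 rest =>
    simp only [pvBoundsBad]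
    have hxne : (c0 :: rest).map (fun c : Int × Int => c.1) ≠ [] := by simp
    have hyne : (c0 :: rest).map (fun c : Int × Int => c.2) ≠ [] := by simp
    cases hmnx : PySem.List.min? ((c0 :: rest).map (fun c : Int × Int => c.1)) (fun v => v) with
    | none => exact absurd ((PySem.List.min?_eq_none_iff _ _).mp hmnx) hxne
    | some mnx =>
    cases hmxx : PySem.List.max? ((c0 :: rest).map (fun c : Int × Int => c.1)) (fun v => v) with
    | none => exact absurd ((PySem.List.max?_eq_none_iff _ _).mp hmxx) hxne
    | some mxx =>
    cases hmny : PySem.List.min? ((c0 :: rest).map (fun c : Int × Int => c.2)) (fun v => v) with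
    | none => exact absurd ((PySem.List.min?_eq_none_iff _ _).mp hmny) hyne
    | some mny =>
    cases hmxy : PySem.List.max? ((c0 :: rest).map (fun c : Int × Int => c.2)) (fun v => v) with
    | none => exact absurd ((PySem.List.max?_eq_none_iff _ _).mp hmxy) hyne
    | some mxy =>
    simp only [Bool.or_eq_false_iff, decide_eq_false_iff_not]
    constructor
    · rintro ⟨⟨⟨h1, h2⟩, h3⟩, h4⟩ c hc
      have hx1 := PySem.List.min?_isMin hmnx c.1 (List.mem_map.mpr ⟨c, hc, rfl⟩)
      have hx2 := PySem.List.max?_isMax hmxx c.1 (List.mem_map.mpr ⟨c, hc, rfl⟩)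
      have hy1 := PySem.List.min?_isMin hmny c.2 (List.mem_map.mpr ⟨c, hc, rfl⟩)
      have hy2 := PySem.List.max?_isMax hmxy c.2 (List.mem_map.mpr ⟨c, hc, rfl⟩)
      simp only at hx1 hx2 hy1 hy2
      omega
    · intro hall
      obtain ⟨cx, hcx, hcx'⟩ := List.mem_map.mp (PySem.List.min?_mem hmnx)
      obtain ⟨dx, hdx, hdx'⟩ := List.mem_map.mp (PySem.List.max?_mem hmxx)
      obtain ⟨cy, hcy, hcy'⟩ := List.mem_map.mp (PySem.List.min?_mem hmny)
      obtain ⟨dy, hdy, hdy'⟩ := List.mem_map.mp (PySem.List.max?_mem hmxy)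
      have h1 := hall cx hcx
      have h2 := hall dx hdx
      have h3 := hall cy hcy
      have h4 := hall dy hdy
      omega

lemma pvMap_id (l : List (Int × Int)) : l.map (fun c => (c.1, c.2)) = l := by
  simp

lemma pvAlt_true_iff (sc : List (Int × Int)) (ships : List (List (Int × Int))) (w h : Int) :
    validate_ship_coordinates_alt sc ships w h = true ↔
      (∀ c ∈ sc, 0 ≤ c.1 ∧ c.1 < w ∧ 0 ≤ c.2 ∧ c.2 < h) ∧
      ∀ c ∈ sc, ¬ ∃ s ∈ ships, c ∈ s := by
  unfold validate_ship_coordinates_alt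
  cases hbb : pvBoundsBad sc w h with
  | true =>
    rw [if_pos rfl]
    simp only [Bool.false_eq_true, false_iff]
    rintro ⟨hbnd, -⟩
    rw [← pvBoundsBad_false_iff sc w h] at hbnd
    rw [hbb] at hbnd
    exact Bool.true_eq_false ▸ (by simp at hbnd)
  | false =>
    rw [if_neg (by simp)]
    rw [pvMergeLoop_true_iff _ _ (pvSorted2_pairwise _) (pvSorted2_pairwise _)]
    have hbnd := (pvBoundsBad_false_iff sc w h).mp hbb
    have hmemN : ∀ a : Int × Int,
        (a ∈ PySem.List.sorted2 (sc.map (fun c => (c.1, c.2))) Prod.fst Prod.snd ↔ a ∈ sc) := by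
      intro a
      rw [(PySem.List.sorted2_perm _ _ _ _).mem_iff, pvMap_id]
    have hmemO : ∀ a : Int × Int,
        (a ∈ PySem.List.sorted2 (ships.flatMap (fun ship => ship.map (fun c => (c.1, c.2)))) Prod.fst Prod.snd ↔
          ∃ s ∈ ships, a ∈ s) := by
      intro a
      rw [(PySem.List.sorted2_perm _ _ _ _).mem_iff]
      simp only [List.mem_flatMap, pvMap_id]
    constructor
    · intro hr
      refine ⟨hbnd, fun c hc hex => ?_⟩
      exact hr c ((hmemN c).mpr hc) ((hmemO c).mpr hex)
    · rintro ⟨-, hno⟩ a haN haO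
      exact hno a ((hmemN a).mp haN) ((hmemO a).mp haO)

-- ===== VERDICT (by name: the statement is the Claim_ definition above) =====
theorem validate_ship_coordinates_spec : Claim_equal_validate_ship_coordinates := by
  intro sc ships w h _
  unfold Spec_validate_ship_coordinates
  rw [Bool.eq_iff_iff, pvA_true_iff, pvAlt_true_iff]
  constructor
  · intro hA
    exact ⟨fun c hc => (hA c hc).1, fun c hc => (hA c hc).2⟩
  · intro hB c hc
    exact ⟨hB.1 c hc, hB.2 c hc⟩
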